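-- pv_equiv track=rewrite | github.com/garmlegarmle/utility-box | scripts/sync_market_data.py | parse_tickers
-- ===== SOURCE A (Python) =====
-- def parse_tickers(raw: str) -> list[str]:
--     values: list[str] = []
--     for chunk in str(raw or "").replace(",", "\n").splitlines():
--         for item in chunk.split():
--             normalized = item.strip()
--             if normalized:
--                 values.append(normalized)
--     deduped: list[str] = []
--     seen = set()
--     for value in values:
--         key = value.upper()
--         if key in seen:
--             continue
--         seen.add(key)
--         deduped.append(value)
--     return deduped
-- ===== SOURCE B (Python) =====
-- def parse_tickers(raw: str) -> list[str]:
--     # Single character-level state machine: accumulate a token until a comma or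
--     # whitespace, record it in an insertion-ordered dict keyed by its uppercase
--     # form (setdefault keeps the first casing), and return the dict's values.
--     text = str(raw or "")
--     first: dict[str, str] = {}
--     token = ""
--     for ch in text + ",":
--         if ch == "," or ch.isspace():
--             if token:
--                 first.setdefault(token.upper(), token)
--             token = ""
--         else:
--             token += ch
--     return list(first.values())
-- ===== Notes on version B (the rewrite author's own statement) =====
-- stated objective: alternative
-- what changed: Replaces A's string-method pipeline (replace/splitlines/split/strip building a token list, then a separate seen-set dedup loop over it) by a single character-level state machine that accumulates tokens by hand and records each in an insertion-ordered dict keyed by the uppercased token via setdefault, returning the dict's values.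
import Mathlib
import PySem

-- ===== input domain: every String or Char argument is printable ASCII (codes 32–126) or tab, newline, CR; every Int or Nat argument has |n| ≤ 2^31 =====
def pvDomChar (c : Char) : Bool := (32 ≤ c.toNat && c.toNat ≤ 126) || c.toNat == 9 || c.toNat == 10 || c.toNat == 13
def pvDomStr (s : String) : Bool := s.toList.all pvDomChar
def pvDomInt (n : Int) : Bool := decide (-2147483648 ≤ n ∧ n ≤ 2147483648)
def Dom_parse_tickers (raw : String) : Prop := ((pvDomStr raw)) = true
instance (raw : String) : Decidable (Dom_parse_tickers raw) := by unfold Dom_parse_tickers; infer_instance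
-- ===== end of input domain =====

-- B replaces A's string-method pipeline plus separate seen-set dedup loop by a single
-- character-level state machine recording first occurrences in an insertion-ordered dict
-- keyed by the uppercased token (objective: alternative).


-- ===== PORT A =====
def parse_tickers (raw : String) : List String :=
  let s := if raw == "" then "" else raw          -- str(raw or "")
  let values : List String :=
    (PySem.Str.splitlines (PySem.Str.replace s "," "\n")).foldl
      (fun vs chunk =>
        (PySem.Str.split₀ chunk).foldl
          (fun vs item =>
            let normalized := PySem.Str.strip item
            if normalized ≠ "" then vs ++ [normalized] else vs) vs) []
  (values.foldl
    (fun (st : PySem.Set String × List String) value =>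
      let key := PySem.Str.upper value
      if PySem.Set.contains st.1 key then st
      else (PySem.Set.add st.1 key, st.2 ++ [value]))
    (PySem.Set.empty, [])).2

-- ===== PORT B =====
-- one pass over the characters of text + ",": flush the accumulated token at a comma or
-- whitespace into a dict keyed by its uppercase form (setdefault keeps the first casing)
def parse_tickers_alt (raw : String) : List String :=
  let text := if raw == "" then "" else raw       -- str(raw or "")
  ((text.toList ++ [',']).foldl
    (fun (st : PySem.Dict String String × List Char) ch =>
      if ch = ',' || PySem.Chars.isspace ch then
        ((if st.2.isEmpty then st.1
          else st.1.setdefault (PySem.Str.upper (String.ofList st.2)) (String.ofList st.2)), [])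
      else (st.1, st.2 ++ [ch]))
    (PySem.Dict.empty, ([] : List Char))).1.values

-- ===== PRECONDITION & SPEC =====
def Spec_parse_tickers (raw : String) (out : List String) : Prop := out = parse_tickers_alt raw
instance (raw : String) (out : List String) : Decidable (Spec_parse_tickers raw out) := by unfold Spec_parse_tickers; infer_instance

-- ===== CLAIM (what is proved, stated in full; the proofs are below) =====
def Claim_equal_parse_tickers : Prop := ∀ (raw : String), Dom_parse_tickers raw → Spec_parse_tickers raw (parse_tickers raw)

-- ===== LEMMAS AND PROOFS =====

theorem go_acc (t : List Char) : ∀ cur acc, PySem.Chars.split₀.go t cur acc = acc.reverse ++ PySem.Chars.split₀.go t cur [] := by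
  induction t with
  | nil => intro cur acc; by_cases h : cur.isEmpty <;> simp [PySem.Chars.split₀.go, h]
  | cons c rest ih =>
    intro cur acc
    by_cases hc : PySem.Chars.isspace c <;> by_cases hcur : cur.isEmpty <;>
        simp only [PySem.Chars.split₀.go, hc, hcur, if_true, if_false, Bool.false_eq_true] <;>
      (rw [ih]; try (rw [ih [] [cur.reverse]]; simp))

theorem go_nil (cur acc) : PySem.Chars.split₀.go [] cur acc
    = acc.reverse ++ (if cur.isEmpty then [] else [cur.reverse]) := by
  by_cases h : cur.isEmpty <;> simp [PySem.Chars.split₀.go, h]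

theorem go_break (b : Char) (t' : List Char) (hb : PySem.Chars.isspace b = true) (l : List Char) :
    ∀ cur acc, PySem.Chars.split₀.go (l ++ b :: t') cur acc
      = PySem.Chars.split₀.go l cur acc ++ PySem.Chars.split₀.go t' [] [] := by
  induction l with
  | nil =>
    intro cur acc
    by_cases hcur : cur.isEmpty <;>
        simp only [List.nil_append, PySem.Chars.split₀.go, hb, hcur, if_true, if_false,
          Bool.false_eq_true] <;>
      rw [go_acc]
  | cons c rest ih =>
    intro cur acc
    by_cases hc : PySem.Chars.isspace c <;> by_cases hcur : cur.isEmpty <;>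
      simp only [List.cons_append, PySem.Chars.split₀.go, hc, hcur, if_true, if_false,
        Bool.false_eq_true] <;> apply ih

theorem go_congr : ∀ {u v : List Char},
    List.Forall₂ (fun a b => a = b ∨ (PySem.Chars.isspace a = true ∧ PySem.Chars.isspace b = true)) u v →
    ∀ cur acc, PySem.Chars.split₀.go u cur acc = PySem.Chars.split₀.go v cur acc := by
  intro u v h
  induction h with
  | nil => intro cur acc; rfl
  | cons hab htl ih =>
    intro cur acc
    rename_i a b u' v'
    have hsp : PySem.Chars.isspace a = PySem.Chars.isspace b := by
      rcases hab with rfl | ⟨h1, h2⟩ <;> simp [*]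
    by_cases hc : PySem.Chars.isspace a
    · have hb : PySem.Chars.isspace b = true := by rw [← hsp]; exact hc
      by_cases hcur : cur.isEmpty <;>
        simp only [PySem.Chars.split₀.go, hc, hb, hcur, if_true, if_false, Bool.false_eq_true] <;>
        apply ih
    · have hb : PySem.Chars.isspace b = false := by rw [← hsp]; simpa using hc
      have hab' : a = b := by rcases hab with rfl | ⟨h1, _⟩; rfl; simp [h1] at hc
      subst hab'
      simp only [PySem.Chars.split₀.go, hc, if_false, Bool.false_eq_true]
      apply ih

theorem tokens_good : ∀ (t cur : List Char) (acc : List (List Char)),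
    (∀ c ∈ cur, PySem.Chars.isspace c = false) →
    (∀ w ∈ acc, w ≠ [] ∧ ∀ c ∈ w, PySem.Chars.isspace c = false) →
    ∀ w ∈ PySem.Chars.split₀.go t cur acc, w ≠ [] ∧ ∀ c ∈ w, PySem.Chars.isspace c = false := by
  intro t
  induction t with
  | nil =>
    intro cur acc hcur hacc w hw
    rw [go_nil] at hw
    by_cases h : cur.isEmpty
    · simp [h] at hw; exact hacc w (by simpa using hw)
    · simp [h] at hw
      rcases hw with hw | rfl
      · exact hacc w (by simpa using hw)
      · constructor
        · simpa [List.isEmpty_iff] using h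
        · intro c hc; exact hcur c (by simpa using hc)
  | cons c rest ih =>
    intro cur acc hcur hacc w hw
    by_cases hc : PySem.Chars.isspace c
    · by_cases hce : cur.isEmpty <;>
        simp only [PySem.Chars.split₀.go, hc, hce, if_true, if_false, Bool.false_eq_true] at hw
      · exact ih cur acc hcur hacc w (by simpa [List.isEmpty_iff.mp hce] using hw)
      · refine ih [] _ (by simp) ?_ w hw
        intro v hv
        rcases List.mem_cons.mp hv with rfl | hv
        · constructor
          · simpa [List.isEmpty_iff] using hce
          · intro d hd; exact hcur d (by simpa using hd)
        · exact hacc v hv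
    · simp only [PySem.Chars.split₀.go, hc, if_false, Bool.false_eq_true] at hw
      refine ih (c :: cur) acc ?_ hacc w hw
      intro d hd
      rcases List.mem_cons.mp hd with rfl | hd
      · simpa using hc
      · exact hcur d hd

theorem strip_noSpace (w : List Char) (h : ∀ c ∈ w, PySem.Chars.isspace c = false) :
    PySem.Chars.strip w = w := by
  have h1 : PySem.Chars.lstrip w = w := by
    unfold PySem.Chars.lstrip
    cases w with
    | nil => rfl
    | cons c t => simp [List.dropWhile, h c (by simp)]
  have h2 : PySem.Chars.rstrip w = w := by
    unfold PySem.Chars.rstrip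
    cases hw : w.reverse with
    | nil => simp at hw; simp [hw]
    | cons c t =>
      have hc : c ∈ w := by rw [← List.mem_reverse, hw]; simp
      simp [List.dropWhile, h c hc, ← hw]
  rw [PySem.Chars.strip, h1, h2]

theorem replace_go_single (a b : Char) : ∀ (fuel : Nat) (s acc : List Char), s.length ≤ fuel →
    PySem.Chars.replace.go [a] [b] fuel s acc
      = acc.reverse ++ s.map (fun c => if c = a then b else c) := by
  intro fuel
  induction fuel with
  | zero =>
    intro s acc hs
    have : s = [] := by simpa using List.length_eq_zero_iff.mp (Nat.le_zero.mp hs)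
    subst this; simp [PySem.Chars.replace.go]
  | succ n ih =>
    intro s acc hs
    cases s with
    | nil => simp [PySem.Chars.replace.go]
    | cons c t =>
      by_cases hca : c = a
      · subst hca
        have hpre : List.isPrefixOf [c] (c :: t) = true := by simp [List.isPrefixOf]
        simp only [PySem.Chars.replace.go, hpre, if_true, List.length_cons, List.length_nil,
          List.drop_succ_cons, List.drop_zero, List.reverse_cons, List.reverse_nil, List.nil_append]
        rw [List.singleton_append, ih t (b :: acc) (by simpa using Nat.le_of_succ_le_succ hs)]
        simp
      · have hpre : List.isPrefixOf [a] (c :: t) = false := by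
          simp [List.isPrefixOf]; exact fun h => hca h.symm
        simp only [PySem.Chars.replace.go, hpre, if_false, Bool.false_eq_true]
        rw [ih t (c :: acc) (by simpa using Nat.le_of_succ_le_succ hs)]
        simp [hca]

theorem replace_single (s : List Char) (a b : Char) :
    PySem.Chars.replace s [a] [b] = s.map (fun c => if c = a then b else c) := by
  simp [PySem.Chars.replace, replace_go_single a b s.length s [] le_rfl]

theorem slgo_crlf (isB : Char → Bool) (rest cur acc) :
    PySem.Chars.splitlines.go isB ('\x0d' :: '\n' :: rest) cur acc
      = PySem.Chars.splitlines.go isB rest [] (cur.reverse :: acc) := by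
  simp [PySem.Chars.splitlines.go]

theorem slgo_break (isB : Char → Bool) (c : Char) (rest cur acc) (h : isB c = true)
    (hg : ∀ rest', c = '\x0d' → rest = '\n' :: rest' → False) :
    PySem.Chars.splitlines.go isB (c :: rest) cur acc
      = PySem.Chars.splitlines.go isB rest [] (cur.reverse :: acc) := by
  rw [PySem.Chars.splitlines.go.eq_def]
  split
  · simp_all
  · rename_i h1 h2; simp at h2; exact (hg h1 h2.1 h2.2).elim
  · simp_all

theorem slgo_chr (isB : Char → Bool) (c : Char) (rest cur acc) (h : isB c = false)
    (hg : ∀ rest', c = '\x0d' → rest = '\n' :: rest' → False) :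
    PySem.Chars.splitlines.go isB (c :: rest) cur acc
      = PySem.Chars.splitlines.go isB rest (c :: cur) acc := by
  rw [PySem.Chars.splitlines.go.eq_def]
  split
  · simp_all
  · rename_i h1 h2; simp at h2; exact (hg h1 h2.1 h2.2).elim
  · simp_all

theorem lines_flat (isB : Char → Bool) (hB : ∀ c, isB c = true → PySem.Chars.isspace c = true) :
    ∀ (t cur : List Char) (acc : List (List Char)),
      (PySem.Chars.splitlines.go isB t cur acc).flatMap PySem.Chars.split₀
        = acc.reverse.flatMap PySem.Chars.split₀ ++ PySem.Chars.split₀ (cur.reverse ++ t) := by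
  intro t cur acc
  induction t, cur, acc using PySem.Chars.splitlines.go.induct isB with
  | case1 cur acc hcur =>
    rw [PySem.Chars.splitlines.go.eq_def]
    simp only [hcur, if_true]
    simp [List.isEmpty_iff.mp hcur, PySem.Chars.split₀, PySem.Chars.split₀.go]
  | case2 cur acc hcur =>
    rw [PySem.Chars.splitlines.go.eq_def]
    simp only [hcur, if_false, Bool.false_eq_true]
    simp [PySem.Chars.split₀]
  | case3 rest cur acc ih =>
    rw [slgo_crlf, ih]
    unfold PySem.Chars.split₀
    rw [go_break '\x0d' ('\n' :: rest) (by decide) cur.reverse [] []]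
    have : PySem.Chars.split₀.go ('\n' :: rest) [] [] = PySem.Chars.split₀.go rest [] [] := by
      simp [PySem.Chars.split₀.go, show PySem.Chars.isspace '\n' = true from by decide]
    simp [this]
  | case4 c rest cur acc hg hc ih =>
    rw [slgo_break isB c rest cur acc hc hg, ih]
    unfold PySem.Chars.split₀
    rw [go_break c rest (hB c hc) cur.reverse [] []]
    simp
  | case5 c rest cur acc hg hc ih =>
    rw [slgo_chr isB c rest cur acc (by simpa using hc) hg, ih]
    simp

theorem flat_splitlines (X : List Char) :
    (PySem.Chars.splitlines X).flatMap PySem.Chars.split₀ = PySem.Chars.split₀ X := by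
  unfold PySem.Chars.splitlines
  rw [lines_flat _ ?hB X [] []]
  · simp
  case hB =>
    intro c h
    simp only [PySem.Chars.isspace]
    simp only [Bool.or_eq_true, Bool.and_eq_true, decide_eq_true_eq] at h ⊢
    omega

theorem split_comma_eq (X : List Char) :
    PySem.Chars.split₀ (X.map (fun c => if c = ',' then '\n' else c))
      = PySem.Chars.split₀ (X.map (fun c => if c = ',' then ' ' else c)) := by
  unfold PySem.Chars.split₀
  apply go_congr
  induction X with
  | nil => simp
  | cons c t ih =>
    simp only [List.map_cons, List.forall₂_cons]
    refine ⟨?_, ih⟩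
    by_cases h : c = ','
    · subst h; right; constructor <;> decide
    · simp [h]

-- tokens of str.split() are nonempty and whitespace-free, so strip is the identity on them
theorem token_good_str (chunk item : String) (h : item ∈ PySem.Str.split₀ chunk) :
    PySem.Str.strip item = item ∧ item ≠ "" := by
  have hmem : item.toList ∈ PySem.Chars.split₀ chunk.toList := by
    rw [← PySem.Str.split₀_map_toList]
    exact List.mem_map_of_mem h
  have hg := tokens_good chunk.toList [] [] (by simp) (by simp) item.toList hmem
  refine ⟨?_, ?_⟩
  · rw [← String.toList_inj, PySem.Str.toList_strip, strip_noSpace _ hg.2]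
  · intro he; subst he; exact hg.1 rfl

theorem inner_fold (l : List String) (h : ∀ x ∈ l, PySem.Str.strip x = x ∧ x ≠ "") :
    ∀ vs, l.foldl (fun vs item =>
        let normalized := PySem.Str.strip item
        if normalized ≠ "" then vs ++ [normalized] else vs) vs = vs ++ l := by
  induction l with
  | nil => intro vs; simp
  | cons x t ih =>
    intro vs
    obtain ⟨h1, h2⟩ := h x (by simp)
    rw [List.foldl_cons]
    have hacc : (let normalized := PySem.Str.strip x;
        if normalized ≠ "" then vs ++ [normalized] else vs) = vs ++ [x] := by
      simp only [h1]; simp [h2]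
    rw [hacc, ih (fun y hy => h y (by simp [hy]))]
    simp

theorem values_eq (s : String) :
    ((PySem.Str.splitlines (PySem.Str.replace s "," "\n")).foldl
      (fun vs chunk =>
        (PySem.Str.split₀ chunk).foldl
          (fun vs item =>
            let normalized := PySem.Str.strip item
            if normalized ≠ "" then vs ++ [normalized] else vs) vs) [])
    = PySem.Str.split₀ (PySem.Str.replace s "," " ") := by
  have hfun : (fun (vs : List String) (chunk : String) =>
      (PySem.Str.split₀ chunk).foldl
        (fun vs item =>
          let normalized := PySem.Str.strip item
          if normalized ≠ "" then vs ++ [normalized] else vs) vs)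
      = fun vs chunk => vs ++ PySem.Str.split₀ chunk := by
    funext vs chunk
    exact inner_fold _ (fun x hx => token_good_str chunk x hx) vs
  rw [hfun, PySem.List.foldl_append_eq_flatMap, List.nil_append]
  apply List.map_injective_iff.mpr (fun a b hab => String.toList_inj.mp hab)
  rw [List.map_flatMap]
  have h1 : (fun c : String => List.map String.toList (PySem.Str.split₀ c))
      = fun c : String => PySem.Chars.split₀ c.toList := by
    funext c; exact PySem.Str.split₀_map_toList c
  rw [h1, show (fun c : String => PySem.Chars.split₀ c.toList)
      = (fun c : String => PySem.Chars.split₀ (String.toList c)) from rfl,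
    ← List.flatMap_map String.toList PySem.Chars.split₀, PySem.Str.splitlines_map_toList,
    PySem.Str.toList_replace, flat_splitlines, PySem.Str.split₀_map_toList, PySem.Str.toList_replace]
  show PySem.Chars.split₀ (PySem.Chars.replace s.toList [','] ['\n'])
      = PySem.Chars.split₀ (PySem.Chars.replace s.toList [','] [' '])
  rw [replace_single, replace_single, split_comma_eq]

-- B's character scan produces exactly the dict obtained by folding setdefault over the
-- whitespace tokens of the comma-to-space-mapped character list
theorem scan_go : ∀ (cs cur : List Char) (d : PySem.Dict String String),
    ((cs ++ [',']).foldl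
      (fun (st : PySem.Dict String String × List Char) ch =>
        if ch = ',' || PySem.Chars.isspace ch then
          ((if st.2.isEmpty then st.1
            else st.1.setdefault (PySem.Str.upper (String.ofList st.2)) (String.ofList st.2)), [])
        else (st.1, st.2 ++ [ch]))
      (d, cur)).1
    = (PySem.Chars.split₀.go (cs.map (fun c => if c = ',' then ' ' else c)) cur.reverse []).foldl
        (fun d w => d.setdefault (PySem.Str.upper (String.ofList w)) (String.ofList w)) d := by
  intro cs
  induction cs with
  | nil =>
    intro cur d
    by_cases h : cur = []
    · subst h; simp [PySem.Chars.split₀.go]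
    · simp [PySem.Chars.split₀.go, h]
  | cons c cs ih =>
    intro cur d
    by_cases hc : (c = ',' || PySem.Chars.isspace c) = true
    · have hfc : PySem.Chars.isspace (if c = ',' then ' ' else c) = true := by
        by_cases h1 : c = ','
        · simp only [h1, if_true]; decide
        · rcases Bool.or_eq_true_iff.mp hc with h2 | h2
          · exact absurd (by simpa using h2) h1
          · simp [h1, h2]
      by_cases hcur : cur.isEmpty
      · simp only [List.cons_append, List.foldl_cons, hc, if_true, hcur, List.map_cons]
        rw [ih [] d]
        simp only [PySem.Chars.split₀.go, hfc, if_true, List.isEmpty_reverse, hcur,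
          List.reverse_nil]
      · simp only [List.cons_append, List.foldl_cons, hc, if_true, hcur, List.map_cons,
          Bool.false_eq_true, if_false]
        rw [ih [] _]
        simp only [PySem.Chars.split₀.go, hfc, if_true, List.isEmpty_reverse, hcur,
          Bool.false_eq_true, if_false, List.reverse_reverse, List.reverse_nil]
        rw [go_acc _ [] [cur]]
        simp
    · have hc' : c ≠ ',' ∧ PySem.Chars.isspace c = false := by
        simpa [not_or] using hc
      simp only [List.cons_append, List.foldl_cons, hc, Bool.false_eq_true, if_false,
        List.map_cons, if_neg hc'.1]
      rw [ih (cur ++ [c]) d]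
      simp only [PySem.Chars.split₀.go, hc'.2, Bool.false_eq_true, if_false,
        List.reverse_append, List.reverse_cons, List.reverse_nil, List.nil_append,
        List.singleton_append]

-- the dict-setdefault dedup and A's seen-set dedup produce the same value list
theorem dedup_dict : ∀ (ts : List String) (d : PySem.Dict String String)
    (s : PySem.Set String) (l : List String),
    d.keys.Nodup →
    (∀ k, PySem.Set.contains s k = d.contains k) →
    d.values = l →
    (ts.foldl (fun d t => d.setdefault (PySem.Str.upper t) t) d).values
      = (ts.foldl (fun (st : PySem.Set String × List String) value =>
          let key := PySem.Str.upper value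
          if PySem.Set.contains st.1 key then st
          else (PySem.Set.add st.1 key, st.2 ++ [value])) (s, l)).2 := by
  intro ts
  induction ts with
  | nil => intro d s l hnd hcont hval; simpa using hval
  | cons t ts ih =>
    intro d s l hnd hcont hval
    simp only [List.foldl_cons]
    by_cases hk : d.contains (PySem.Str.upper t) = true
    · rw [PySem.Dict.setdefault_of_contains d t hk]
      have hsk : PySem.Set.contains s (PySem.Str.upper t) = true := by rw [hcont]; exact hk
      simp only [hsk, if_true]
      exact ih d s l hnd hcont hval
    · have hk' : d.contains (PySem.Str.upper t) = false := by simpa using hk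
      rw [PySem.Dict.setdefault_of_not_contains d t hk']
      have hsk : PySem.Set.contains s (PySem.Str.upper t) = false := by rw [hcont]; exact hk'
      simp only [hsk, Bool.false_eq_true, if_false]
      have hmem : PySem.Str.upper t ∉ s := by simpa using hsk
      have hadd : PySem.Set.add s (PySem.Str.upper t) = s ++ [PySem.Str.upper t] := by
        simp [PySem.Set.add, hmem]
      rw [hadd]
      refine ih _ _ _ (PySem.Dict.nodup_keys_insert d _ t hnd) ?_ ?_
      · intro k
        have h1 := hcont k
        simp only [PySem.Set.contains_eq_listContains] at h1 ⊢
        rw [PySem.Dict.contains_insert, ← h1]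
        by_cases hkt : k = PySem.Str.upper t <;> simp [hkt, Bool.or_comm]
      · rw [show (d.insert (PySem.Str.upper t) t).values = d.values ++ [t] from by
          simp only [PySem.Dict.values, PySem.Dict.items_insert_of_not_contains d t hk']
          simp, hval]

-- ===== VERDICT (by name: the statement is the Claim_ definition above) =====
theorem parse_tickers_spec : Claim_equal_parse_tickers := by
  intro raw _
  unfold Spec_parse_tickers parse_tickers parse_tickers_alt
  have hs : (if raw == "" then "" else raw) = raw := by
    by_cases h : raw = "" <;> simp [h]
  simp only [hs]
  rw [values_eq raw, scan_go raw.toList [] PySem.Dict.empty]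
  have hmap : raw.toList.map (fun c => if c = ',' then ' ' else c)
      = (PySem.Str.replace raw "," " ").toList := by
    rw [PySem.Str.toList_replace]
    exact (replace_single raw.toList ',' ' ').symm
  rw [hmap]
  have htok : PySem.Chars.split₀.go (PySem.Str.replace raw "," " ").toList ([] : List Char).reverse []
      = (PySem.Str.split₀ (PySem.Str.replace raw "," " ")).map String.toList := by
    rw [PySem.Str.split₀_map_toList]; rfl
  rw [htok, List.foldl_map]
  simp only [String.ofList_toList]
  rw [dedup_dict (PySem.Str.split₀ (PySem.Str.replace raw "," " ")) PySem.Dict.empty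
    PySem.Set.empty [] (by simp) (by intro k; rfl) rfl]
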